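-- pv_equiv track=rewrite | github.com/bmangia/orga-datasciense | src/python/svmconstop.py | generando_diccionario
-- ===== SOURCE A (Python) =====
-- def generando_diccionario(diccionario,texto,indice):
--     diccionario_aux = {}
--     for palabra in texto:
--             if palabra in diccionario and not( palabra in diccionario_aux):
--                 diccionario[palabra][1] = diccionario[palabra][1] + 1
--
--             elif not(palabra in diccionario):
--                 diccionario[palabra] = [indice,1]
--                 indice += 1
--
--             diccionario_aux[palabra] = 1
--
--     return indice
-- ===== SOURCE B (Python) =====
-- def generando_diccionario(diccionario, texto, indice):
--     # Staged algorithm: dedup once, partition the distinct words into existing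
--     # vs new, then run two branch-free passes; indices for the new words come
--     # from enumerate and the result is the closed form indice + len(nuevas).
--     # Performs the same in-place dict mutation as the original.
--     distintas = dict.fromkeys(texto)
--     existentes = [p for p in distintas if p in diccionario]
--     nuevas = [p for p in distintas if p not in diccionario]
--     for p in existentes:
--         diccionario[p][1] += 1
--     for i, p in enumerate(nuevas, start=indice):
--         diccionario[p] = [i, 1]
--     return indice + len(nuevas)
-- ===== Notes on version B (the rewrite author's own statement) =====
-- stated objective: alternative
-- what changed: B replaces A's single branching loop with interleaved aux-dict bookkeeping by a staged algorithm: dedup once, partition distinct words into existing vs new, run two branch-free update passes (indices assigned by enumerate), and return the closed form indice + len(nuevas) instead of an incremented accumulator.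
import Mathlib
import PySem

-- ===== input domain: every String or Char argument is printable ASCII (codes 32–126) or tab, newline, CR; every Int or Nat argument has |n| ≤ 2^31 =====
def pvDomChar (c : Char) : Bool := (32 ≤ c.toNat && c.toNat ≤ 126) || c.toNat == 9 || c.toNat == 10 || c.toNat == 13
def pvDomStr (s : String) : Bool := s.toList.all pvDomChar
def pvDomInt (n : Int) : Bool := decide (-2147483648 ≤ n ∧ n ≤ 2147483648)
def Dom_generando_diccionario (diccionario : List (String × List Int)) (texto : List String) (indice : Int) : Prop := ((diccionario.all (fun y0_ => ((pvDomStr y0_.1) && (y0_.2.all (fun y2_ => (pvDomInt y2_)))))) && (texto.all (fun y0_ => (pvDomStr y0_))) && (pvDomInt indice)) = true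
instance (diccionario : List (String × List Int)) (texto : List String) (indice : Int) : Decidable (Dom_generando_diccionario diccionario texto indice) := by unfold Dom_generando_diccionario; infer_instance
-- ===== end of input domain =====

-- B stages the work (dedup, partition into existing/new distinct words, two branch-free
-- passes, closed-form return) instead of A's single branching loop with an aux seen-dict;
-- both mutate the dict identically in Python, and the equivalence proved is about the
-- RETURN value.

-- ===== PORT A =====
-- loop body of A; state: (diccionario, diccionario_aux, indice)
def pvStepA (st : PySem.Dict String (List Int) × PySem.Dict String Int × Int) (palabra : String) :
    PySem.Dict String (List Int) × PySem.Dict String Int × Int :=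
  if st.1.contains palabra && !(st.2.1.contains palabra) then
    -- diccionario[palabra][1] = diccionario[palabra][1] + 1  (IndexError if the list is short: excluded by Pre_)
    (st.1.insert palabra
       (PySem.List.pySetD (st.1.getD palabra []) 1 (PySem.List.pyGetD (st.1.getD palabra []) 1 0 + 1)),
     st.2.1.insert palabra 1, st.2.2)
  else if !(st.1.contains palabra) then
    (st.1.insert palabra [st.2.2, 1], st.2.1.insert palabra 1, st.2.2 + 1)
  else
    (st.1, st.2.1.insert palabra 1, st.2.2)

def generando_diccionario (diccionario : List (String × List Int)) (texto : List String) (indice : Int) : Int :=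
  (texto.foldl pvStepA (PySem.Dict.ofList diccionario, PySem.Dict.empty, indice)).2.2

-- ===== PORT B =====
-- B's two update loops only mutate the dict in place (a side effect); the RETURN value is
-- indice + len(nuevas), so the return-value port computes distintas/existentes/nuevas as in
-- Source B and returns the closed form.
def generando_diccionario_alt (diccionario : List (String × List Int)) (texto : List String) (indice : Int) : Int :=
  let dic := PySem.Dict.ofList diccionario
  let distintas := PySem.List.dedup texto            -- dict.fromkeys(texto)
  let nuevas := distintas.filter (fun p => !(dic.contains p))
  indice + (nuevas.length : Int)

-- ===== PRECONDITION & SPEC =====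
-- Pre_ excludes exactly the inputs where the Python raises IndexError (in A and in B alike):
-- a word of texto whose existing dictionary value is a list of length < 2 (both assign to
-- diccionario[palabra][1]).
def Pre_generando_diccionario (diccionario : List (String × List Int)) (texto : List String) (indice : Int) : Prop :=
  ∀ palabra ∈ texto, 2 ≤ ((PySem.Dict.ofList diccionario).getD palabra [0, 0]).length
instance (diccionario : List (String × List Int)) (texto : List String) (indice : Int) : Decidable (Pre_generando_diccionario diccionario texto indice) := by unfold Pre_generando_diccionario; infer_instance
def pvWitness_generando_diccionario : (List (String × List Int)) × List String × Int :=
  ([("a", [0, 2])], ["a", "b", "a"], 1)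

def Spec_generando_diccionario (diccionario : List (String × List Int)) (texto : List String) (indice : Int) (out : Int) : Prop := out = generando_diccionario_alt diccionario texto indice
instance (diccionario : List (String × List Int)) (texto : List String) (indice : Int) (out : Int) : Decidable (Spec_generando_diccionario diccionario texto indice out) := by unfold Spec_generando_diccionario; infer_instance

-- ===== CLAIM (what is proved, stated in full; the proofs are below) =====
def Claim_equal_generando_diccionario : Prop := ∀ (diccionario : List (String × List Int)) (texto : List String) (indice : Int), Dom_generando_diccionario diccionario texto indice → Pre_generando_diccionario diccionario texto indice → Spec_generando_diccionario diccionario texto indice (generando_diccionario diccionario texto indice)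

-- ===== LEMMAS AND PROOFS =====

-- number of distinct words of l that are new relative to key-membership in dic
def pvNewCard (dic : PySem.Dict String (List Int)) (l : List String) : Int :=
  ((l.toFinset.filter (fun w => dic.contains w = false)).card : Int)

theorem pvNewCard_congr (dic dic' : PySem.Dict String (List Int)) (l : List String)
    (h : ∀ x, dic'.contains x = dic.contains x) : pvNewCard dic' l = pvNewCard dic l := by
  unfold pvNewCard
  have he : (l.toFinset.filter (fun w => dic'.contains w = false))
      = (l.toFinset.filter (fun w => dic.contains w = false)) :=
    Finset.filter_congr (fun x _ => by simp [h x])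
  rw [he]

theorem pvNewCard_cons_mem (dic : PySem.Dict String (List Int)) (w : String) (ws : List String)
    (hw : dic.contains w = true) : pvNewCard dic (w :: ws) = pvNewCard dic ws := by
  simp [pvNewCard, List.toFinset_cons, Finset.filter_insert, hw]

-- inserting the head key: the remaining new-count drops the head and the head contributes 1
theorem pvNewCard_cons_new (dic : PySem.Dict String (List Int)) (w : String) (ws : List String)
    (v : List Int) (hw : dic.contains w = false) :
    pvNewCard (dic.insert w v) ws + 1 = pvNewCard dic (w :: ws) := by
  have hfilt : (ws.toFinset.filter (fun x => (dic.insert w v).contains x = false))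
      = (ws.toFinset.filter (fun x => dic.contains x = false)).erase w := by
    rw [← Finset.filter_ne', Finset.filter_filter]
    apply Finset.filter_congr
    intro x _
    rw [PySem.Dict.contains_insert]
    by_cases hxw : x = w
    · simp [hxw]
    · simp [hxw]
  unfold pvNewCard
  rw [hfilt, List.toFinset_cons, Finset.filter_insert, if_pos hw]
  set t := ws.toFinset.filter (fun x => dic.contains x = false) with ht
  have hcard : (insert w t).card = (t.erase w).card + 1 := by
    by_cases hwt : w ∈ t
    · rw [Finset.insert_eq_self.mpr hwt]
      exact (Finset.card_erase_add_one hwt).symm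
    · rw [Finset.erase_eq_of_notMem hwt, Finset.card_insert_of_notMem hwt]
  rw [hcard]
  push_cast
  ring

-- key-membership in the first component is preserved by the count-update step
theorem pvContains_insert_same (dic : PySem.Dict String (List Int)) (w : String) (v : List Int)
    (hw : dic.contains w = true) : ∀ x, (dic.insert w v).contains x = dic.contains x := by
  intro x
  rw [PySem.Dict.contains_insert]
  by_cases hxw : x = w
  · simp [hxw, hw]
  · simp [hxw]

theorem pvAux_inv (aux : PySem.Dict String Int) (dic dic' : PySem.Dict String (List Int)) (w : String)
    (hinv : ∀ x, aux.contains x = true → dic.contains x = true)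
    (hmono : ∀ x, dic.contains x = true → dic'.contains x = true)
    (hw : dic'.contains w = true) :
    ∀ x, (aux.insert w 1).contains x = true → dic'.contains x = true := by
  intro x hx
  rw [PySem.Dict.contains_insert] at hx
  rcases Bool.or_eq_true_iff.mp hx with h | h
  · have : x = w := by simpa using h
    subst this; exact hw
  · exact hmono x (hinv x h)

theorem pvA_loop (texto : List String) (dic : PySem.Dict String (List Int))
    (aux : PySem.Dict String Int) (idx : Int)
    (hinv : ∀ x, aux.contains x = true → dic.contains x = true) :
    (texto.foldl pvStepA (dic, aux, idx)).2.2 = idx + pvNewCard dic texto := by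
  induction texto generalizing dic aux idx with
  | nil => simp [pvNewCard]
  | cons w ws ih =>
    rw [List.foldl_cons]
    by_cases hw : dic.contains w = true
    · by_cases ha : aux.contains w = true
      · -- third branch: word already seen, nothing changes but aux
        have hstep : pvStepA (dic, aux, idx) w = (dic, aux.insert w 1, idx) := by
          simp [pvStepA, hw, ha]
        rw [hstep, ih dic (aux.insert w 1) idx
          (pvAux_inv aux dic dic w hinv (fun x h => h) hw), pvNewCard_cons_mem dic w ws hw]
      · -- first branch: count update; key set and idx unchanged
        have ha' : aux.contains w = false := by simpa using ha
        have hstep : pvStepA (dic, aux, idx) w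
            = (dic.insert w (PySem.List.pySetD (dic.getD w []) 1 (PySem.List.pyGetD (dic.getD w []) 1 0 + 1)),
               aux.insert w 1, idx) := by
          simp [pvStepA, hw, ha']
        set v := PySem.List.pySetD (dic.getD w []) 1 (PySem.List.pyGetD (dic.getD w []) 1 0 + 1) with hv
        have hsame := pvContains_insert_same dic w v hw
        rw [hstep, ih (dic.insert w v) (aux.insert w 1) idx
          (pvAux_inv aux dic (dic.insert w v) w hinv (fun x h => by rw [hsame x]; exact h)
            (by rw [hsame w]; exact hw)),
          pvNewCard_congr dic (dic.insert w v) ws hsame, pvNewCard_cons_mem dic w ws hw]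
    · -- second branch: new word
      have hw' : dic.contains w = false := by simpa using hw
      have hstep : pvStepA (dic, aux, idx) w = (dic.insert w [idx, 1], aux.insert w 1, idx + 1) := by
        simp [pvStepA, hw']
      rw [hstep, ih (dic.insert w [idx, 1]) (aux.insert w 1) (idx + 1)
        (pvAux_inv aux dic (dic.insert w [idx, 1]) w hinv
          (fun x h => by rw [PySem.Dict.contains_insert]; simp [h])
          (by rw [PySem.Dict.contains_insert]; simp)),
        ← pvNewCard_cons_new dic w ws [idx, 1] hw']
      ring

-- B's filtered dedup list counts exactly pvNewCard many words
theorem pvB_count (dic : PySem.Dict String (List Int)) (l : List String) :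
    (((PySem.List.dedup l).filter (fun p => !(dic.contains p))).length : Int)
      = pvNewCard dic l := by
  unfold pvNewCard
  have hnd : ((PySem.List.dedup l).filter (fun p => !(dic.contains p))).Nodup :=
    (PySem.List.nodup_dedup l).filter _
  have hfs : ((PySem.List.dedup l).filter (fun p => !(dic.contains p))).toFinset
      = l.toFinset.filter (fun w => dic.contains w = false) := by
    ext x
    simp
  rw [← List.toFinset_card_of_nodup hnd, hfs]

-- ===== VERDICT (by name: the statement is the Claim_ definition above) =====
theorem generando_diccionario_spec : Claim_equal_generando_diccionario := by
  intro diccionario texto indice _ _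
  unfold Spec_generando_diccionario generando_diccionario generando_diccionario_alt
  rw [pvA_loop texto (PySem.Dict.ofList diccionario) PySem.Dict.empty indice
      (by intro x hx; simp [PySem.Dict.contains_empty] at hx)]
  show indice + pvNewCard (PySem.Dict.ofList diccionario) texto
      = indice + ((((PySem.List.dedup texto).filter
          (fun p => !((PySem.Dict.ofList diccionario).contains p))).length : Nat) : Int)
  rw [pvB_count]
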